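-- pv_equiv track=rewrite | github.com/threealgos/Quantum_Dragon_Algorithm | EXPRIMENTAL_COMPLEX_40-mods.py | get_best_mode_id
-- ===== SOURCE A (Python) =====
-- MODE_METADATA = {
--     # Dragon Modes (0-20)
--     0: {"name": "Hardware Probe", "qubits": 3, "success": "N/A", "type": "Diagnostic"},
--     1: {"name": "IPE Standard", "qubits": 136, "success": 35, "type": "Serial"},
--     2: {"name": "Hive (Chunked)", "qubits": "~70", "success": 55, "type": "Partial"},
--     3: {"name": "Windowed IPE", "qubits": 139, "success": 42, "type": "Windowed"},
--     4: {"name": "Semiclassical", "qubits": 136, "success": 60, "type": "SC"},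
--     5: {"name": "AB Shor", "qubits": 275, "success": 0, "type": "Full", "skip": True},
--     6: {"name": "FT Draper Test", "qubits": 138, "success": "N/A", "type": "Test"},
--     7: {"name": "Geometric IPE", "qubits": 136, "success": 45, "type": "Geometric"},
--     8: {"name": "Verified (Flags)", "qubits": 138, "success": 38, "type": "Verified"},
--     9: {"name": "Shadow 2D", "qubits": 140, "success": 48, "type": "Shadow"},
--     10: {"name": "Reverse IPE", "qubits": 136, "success": 20, "type": "Experimental"},
--     11: {"name": "Swarm", "qubits": "Variable", "success": 25, "type": "Distributed"},
--     12: {"name": "Heavy Draper", "qubits": 140, "success": 5, "type": "FT Test"},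
--     13: {"name": "Compressed Shadow", "qubits": 144, "success": 40, "type": "Compressed"},
--     14: {"name": "Shor Logic", "qubits": 140, "success": 10, "type": "Block"},
--     15: {"name": "Geo IPE (Exp)", "qubits": 136, "success": 45, "type": "Geometric"},
--     16: {"name": "Window Explicit", "qubits": 138, "success": 41, "type": "Windowed"},
--     17: {"name": "Hive Swarm", "qubits": "Variable", "success": 30, "type": "Multi-Worker"},
--     18: {"name": "Explicit Logic", "qubits": 136, "success": 58, "type": "Hardcoded"},
--     19: {"name": "Fixed AB", "qubits": 140, "success": 12, "type": "Experimental"},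
--     20: {"name": "Matrix Mod", "qubits": 135, "success": 80, "type": "Unitary"},
--
--     # Omega Modes (21-39)
--     21: {"name": "HW Probe Omega", "qubits": 3, "success": "N/A", "type": "Diagnostic"},
--     22: {"name": "Phantom Parallel", "qubits": 136, "success": 32, "type": "Serial/2D"},
--     23: {"name": "Shor Parallel", "qubits": 136, "success": 50, "type": "SC Optimized"},
--     24: {"name": "GHZ Parallel", "qubits": 136, "success": 15, "type": "GHZ"},
--     25: {"name": "Verified Parallel", "qubits": 138, "success": 35, "type": "Parallel"},
--     26: {"name": "Hive Edition", "qubits": "~70", "success": 50, "type": "Split"},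
--     27: {"name": "Extra Shadow", "qubits": 136, "success": 46, "type": "2D Group"},
--     28: {"name": "Advanced QPE", "qubits": 136, "success": 55, "type": "Feedback"},
--     29: {"name": "Full Quantum Omega", "qubits": 275, "success": 0, "type": "2-Reg", "skip": True},
--     30: {"name": "Semiclassical Omega", "qubits": 136, "success": 65, "type": "SC+2D"},
--     31: {"name": "Verified Shadow", "qubits": 138, "success": 40, "type": "Shadow+Flags"},
--     32: {"name": "Verified Advanced", "qubits": 140, "success": 30, "type": "Dual Flags"},
--     33: {"name": "Heavy Draper Omega", "qubits": 140, "success": 5, "type": "Full Adder"},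
--     34: {"name": "Compressed Shadow Omega", "qubits": 144, "success": 38, "type": "Compressed"},
--     35: {"name": "Shor Logic Omega", "qubits": 140, "success": 15, "type": "Pure/Mod"},
--     36: {"name": "Geometric IPE Omega", "qubits": 136, "success": 45, "type": "Standard"},
--     37: {"name": "Windowed IPE Omega", "qubits": 140, "success": 44, "type": "Standard"},
--     38: {"name": "Hive Swarm Omega", "qubits": "Variable", "success": 35, "type": "Worker"},
--     39: {"name": "Explicit Logic Omega", "qubits": 136, "success": 55, "type": "Hardcoded"}
-- }
--
-- def get_best_mode_id(bits: int, available_qubits: int) -> int: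
--     """Select optimal mode based on hardware and success rates"""
--
--     # Check for special high-success modes first
--     high_success_modes = [
--         (30, 65),  # Semiclassical Omega - THE KING
--         (4, 60),   # Semiclassical
--         (9, 48),   # Shadow 2D
--         (23, 50),  # Shor Parallel
--         (28, 55),  # Advanced QPE
--         (39, 55),  # Explicit Logic Omega
--     ]
--
--     for mode_id, success in high_success_modes:
--         meta = MODE_METADATA[mode_id]
--         req_qubits = meta["qubits"]
--         if isinstance(req_qubits, str):
--             if "~" in req_qubits:
--                 req_qubits = int(req_qubits.replace("~", ""))
--             else:
--                 continue
--
--         if req_qubits <= available_qubits: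
--             return mode_id
--
--     # Check Hive modes for limited qubits
--     if available_qubits < 100:
--         hive_modes = [2, 26, 17, 38]  # Hive variants
--         for mode_id in hive_modes:
--             meta = MODE_METADATA[mode_id]
--             if isinstance(meta["qubits"], str) and "~" in meta["qubits"]:
--                 estimated = int(meta["qubits"].replace("~", ""))
--                 if estimated <= available_qubits:
--                     return mode_id
--
--     # Default to Semiclassical if nothing else fits
--     return 4
-- ===== SOURCE B (Python) =====
-- def get_best_mode_id(bits: int, available_qubits: int) -> int:
--     """Select optimal mode based on hardware and success rates.
--
--     Closed-form threshold ladder derived from tracing A's loops: every mode in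
--     the high-success list either needs 136+ qubits (first match: 30) or is
--     skipped; below 100 qubits the first Hive variant needs ~70 (mode 2);
--     otherwise the Semiclassical default (4) applies.  bits is unused, as in A.
--     """
--     if available_qubits >= 136:
--         return 30
--     if 70 <= available_qubits < 100:
--         return 2
--     return 4
-- ===== Notes on version B (the rewrite author's own statement) =====
-- stated objective: simpler
-- what changed: Replaced the runtime iteration over the metadata tables and candidate-mode lists (with string parsing of '~70') by a direct closed-form threshold ladder on available_qubits.
import Mathlib
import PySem

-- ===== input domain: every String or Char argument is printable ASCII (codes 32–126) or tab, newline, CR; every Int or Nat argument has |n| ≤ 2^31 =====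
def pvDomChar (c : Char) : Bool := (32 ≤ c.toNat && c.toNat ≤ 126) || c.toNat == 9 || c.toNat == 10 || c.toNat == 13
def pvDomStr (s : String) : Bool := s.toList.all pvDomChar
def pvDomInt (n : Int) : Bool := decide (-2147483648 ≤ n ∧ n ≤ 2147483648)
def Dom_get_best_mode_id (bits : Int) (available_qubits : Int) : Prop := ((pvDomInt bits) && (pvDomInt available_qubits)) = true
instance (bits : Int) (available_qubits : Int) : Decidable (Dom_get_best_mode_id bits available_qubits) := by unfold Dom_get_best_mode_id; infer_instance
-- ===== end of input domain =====

set_option maxRecDepth 40000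


-- B replaces A's runtime scans over the metadata tables (with string parsing of "~70") by a closed-form threshold ladder; objective: simpler.

-- ===== PORT A =====
-- MODE_METADATA, restricted to the "qubits" field the function reads (Int or String, as in Python).
def pvModeQubits : PySem.Dict Int (Int ⊕ String) := PySem.Dict.ofList
  [(0, .inl 3), (1, .inl 136), (2, .inr "~70"), (3, .inl 139), (4, .inl 136),
   (5, .inl 275), (6, .inl 138), (7, .inl 136), (8, .inl 138), (9, .inl 140),
   (10, .inl 136), (11, .inr "Variable"), (12, .inl 140), (13, .inl 144), (14, .inl 140),
   (15, .inl 136), (16, .inl 138), (17, .inr "Variable"), (18, .inl 136), (19, .inl 140),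
   (20, .inl 135), (21, .inl 3), (22, .inl 136), (23, .inl 136), (24, .inl 136),
   (25, .inl 138), (26, .inr "~70"), (27, .inl 136), (28, .inl 136), (29, .inl 275),
   (30, .inl 136), (31, .inl 138), (32, .inl 140), (33, .inl 140), (34, .inl 144),
   (35, .inl 140), (36, .inl 136), (37, .inl 140), (38, .inr "Variable"), (39, .inl 136)]

def pvHighSuccessModes : List (Int × Int) :=
  [(30, 65), (4, 60), (9, 48), (23, 50), (28, 55), (39, 55)]

-- first loop: over high_success_modes; some = early return, none = loop fell through
-- (a missing key or a failing int() cannot occur for the fixed literal table, so those branches fall through)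
def pvHighLoop (aq : Int) : List (Int × Int) → Option Int
  | [] => none
  | (mode_id, _success) :: rest =>
    match pvModeQubits.get? mode_id with
    | some (Sum.inr s) =>
      if PySem.Str.isIn "~" s then
        match PySem.Int.ofStr? (PySem.Str.replace s "~" "") with
        | some req => if req ≤ aq then some mode_id else pvHighLoop aq rest
        | none => pvHighLoop aq rest
      else pvHighLoop aq rest  -- continue
    | some (Sum.inl req) => if req ≤ aq then some mode_id else pvHighLoop aq rest
    | none => pvHighLoop aq rest

-- second loop: over hive_modes
def pvHiveLoop (aq : Int) : List Int → Option Int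
  | [] => none
  | mode_id :: rest =>
    match pvModeQubits.get? mode_id with
    | some (Sum.inr s) =>
      if PySem.Str.isIn "~" s then
        match PySem.Int.ofStr? (PySem.Str.replace s "~" "") with
        | some estimated => if estimated ≤ aq then some mode_id else pvHiveLoop aq rest
        | none => pvHiveLoop aq rest
      else pvHiveLoop aq rest
    | _ => pvHiveLoop aq rest

def get_best_mode_id (bits : Int) (available_qubits : Int) : Int :=
  match pvHighLoop available_qubits pvHighSuccessModes with
  | some m => m
  | none =>
    if available_qubits < 100 then
      match pvHiveLoop available_qubits [2, 26, 17, 38] with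
      | some m => m
      | none => 4
    else 4

-- ===== PORT B =====
def get_best_mode_id_alt (bits : Int) (available_qubits : Int) : Int :=
  if 136 ≤ available_qubits then 30
  else if 70 ≤ available_qubits ∧ available_qubits < 100 then 2
  else 4

-- ===== PRECONDITION & SPEC =====
def Spec_get_best_mode_id (bits : Int) (available_qubits : Int) (out : Int) : Prop := out = get_best_mode_id_alt bits available_qubits
instance (bits : Int) (available_qubits : Int) (out : Int) : Decidable (Spec_get_best_mode_id bits available_qubits out) := by unfold Spec_get_best_mode_id; infer_instance

-- ===== CLAIM (what is proved, stated in full; the proofs are below) =====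
def Claim_equal_get_best_mode_id : Prop := ∀ (bits : Int) (available_qubits : Int), Dom_get_best_mode_id bits available_qubits → Spec_get_best_mode_id bits available_qubits (get_best_mode_id bits available_qubits)

-- ===== LEMMAS AND PROOFS =====
lemma pvGet2 : pvModeQubits.get? 2 = some (Sum.inr "~70") := by decide
lemma pvGet4 : pvModeQubits.get? 4 = some (Sum.inl 136) := by decide
lemma pvGet9 : pvModeQubits.get? 9 = some (Sum.inl 140) := by decide
lemma pvGet17 : pvModeQubits.get? 17 = some (Sum.inr "Variable") := by decide
lemma pvGet23 : pvModeQubits.get? 23 = some (Sum.inl 136) := by decide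
lemma pvGet26 : pvModeQubits.get? 26 = some (Sum.inr "~70") := by decide
lemma pvGet28 : pvModeQubits.get? 28 = some (Sum.inl 136) := by decide
lemma pvGet30 : pvModeQubits.get? 30 = some (Sum.inl 136) := by decide
lemma pvGet38 : pvModeQubits.get? 38 = some (Sum.inr "Variable") := by decide
lemma pvGet39 : pvModeQubits.get? 39 = some (Sum.inl 136) := by decide

lemma pvTilde70 : PySem.Chars.isIn ['~'] ['~', '7', '0'] = true := by decide
lemma pvTildeVar : PySem.Chars.isIn ['~'] ['V', 'a', 'r', 'i', 'a', 'b', 'l', 'e'] = false := by decide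
lemma pvParse70 : PySem.Int.ofStr? (PySem.Str.replace "~70" "~" "") = some 70 := by decide

lemma pvHighLoop_eval (aq : Int) :
    pvHighLoop aq pvHighSuccessModes = if 136 ≤ aq then some 30 else none := by
  by_cases h : 136 ≤ aq
  · simp [pvHighSuccessModes, pvHighLoop, pvGet30, h]
  · have h' : ¬ (140 : Int) ≤ aq := by omega
    simp [pvHighSuccessModes, pvHighLoop, pvGet30, pvGet4, pvGet9, pvGet23, pvGet28, pvGet39, h, h']

lemma pvHiveLoop_eval (aq : Int) :
    pvHiveLoop aq [2, 26, 17, 38] = if 70 ≤ aq then some 2 else none := by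
  by_cases h : 70 ≤ aq <;>
    simp [pvHiveLoop, pvGet2, pvGet26, pvGet17, pvGet38, pvTilde70, pvTildeVar, pvParse70, h]

-- ===== VERDICT (by name: the statement is the Claim_ definition above) =====
theorem get_best_mode_id_spec : Claim_equal_get_best_mode_id := by
  intro bits aq _
  unfold Spec_get_best_mode_id get_best_mode_id get_best_mode_id_alt
  rw [pvHighLoop_eval, pvHiveLoop_eval]
  split_ifs <;> simp_all
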